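-- pv_equiv track=rewrite | github.com/Mr-Fishy/greedy-task-scheduling | __main__.py | min_missed_penalty
-- ===== SOURCE A (Python) =====
-- import heapq
--
-- def min_missed_penalty(tasks: list[tuple[int, int]]) -> int:
--     """
--     Calculates the minimum total penalty for missed unit-time tasks.
--
--     Args:
--         tasks (list[tuple[int, int]]): The list of tasks. Each task is interpreted as `(deadline, penalty)`.
--                                        Deadlines are assumed to be strictly positive integers (>= 1).
--
--     Returns:
--         int: The minimum possible penalty incurred from missed deadlines.
--     """
--     # Sort the tasks by deadline (monotonically increasing)
--     sorted_tasks = sorted(tasks, key = lambda x: x[0])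
--
--     accepted_tasks_heap = []
--     total_missed_penalty = 0
--
--     for deadline, penalty in sorted_tasks:
--         # Push the current task's penalty onto the heap
--         heapq.heappush(accepted_tasks_heap, penalty)
--
--         # The size of the heap represents the time required to complete all accepted tasks.
--         # If it exceeds the current deadline, drop the task with the smallest penalty.
--         if len(accepted_tasks_heap) > deadline:
--             dropped_penalty = heapq.heappop(accepted_tasks_heap)
--             total_missed_penalty += dropped_penalty
--
--     # Return the accumulated penalties.
--     return total_missed_penalty
-- ===== SOURCE B (Python) =====
-- def min_missed_penalty(tasks: list[tuple[int, int]]) -> int: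
--     # No heap: keep accepted penalties as an ascending list, evict from the front,
--     # and report total penalty minus the sum of the kept (completed) tasks.
--     total = 0
--     for _, p in tasks:
--         total += p
--
--     kept = []       # accepted penalties, ascending
--     kept_sum = 0
--     for deadline, penalty in sorted(tasks, key=lambda t: t[0]):
--         i = 0
--         while i < len(kept) and kept[i] <= penalty:
--             i += 1
--         kept.insert(i, penalty)
--         kept_sum += penalty
--         if len(kept) > deadline:
--             kept_sum -= kept[0]   # the minimum sits at the front
--             del kept[0]
--     return total - kept_sum
-- ===== Notes on version B (the rewrite author's own statement) =====
-- stated objective: alternative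
-- what changed: Replaced the binary heap and missed-penalty accumulator by a plain ascending list with front eviction plus a separate total-penalty pre-pass, returning total minus the kept sum.
import Mathlib
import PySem

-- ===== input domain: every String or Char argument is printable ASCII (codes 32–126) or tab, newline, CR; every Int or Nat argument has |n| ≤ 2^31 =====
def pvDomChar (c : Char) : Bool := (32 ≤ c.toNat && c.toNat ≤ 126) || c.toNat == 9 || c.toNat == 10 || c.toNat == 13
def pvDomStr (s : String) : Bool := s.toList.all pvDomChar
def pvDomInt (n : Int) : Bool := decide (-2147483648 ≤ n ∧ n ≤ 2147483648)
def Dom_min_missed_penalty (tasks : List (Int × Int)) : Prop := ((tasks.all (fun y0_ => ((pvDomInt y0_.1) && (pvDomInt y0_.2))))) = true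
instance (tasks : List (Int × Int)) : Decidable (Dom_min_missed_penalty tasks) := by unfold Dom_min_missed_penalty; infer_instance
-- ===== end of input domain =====

-- B replaces A's binary heap + missed accumulator by an ascending kept-list with front
-- eviction and a total-minus-kept-sum computation (objective: alternative, same result).
-- heapq in A is ported by its contract on int heaps: push adds the element, pop removes
-- and returns the minimum (first occurrence) — exact for this program, which only
-- observes the heap's length and the popped values.


-- ===== PORT A =====
-- loop body of A: heappush (add penalty), then pop the minimum if the heap outgrew the deadline
def pvStepA (s : List Int × Int) (tp : Int × Int) : List Int × Int :=
  let heap := s.1 ++ [tp.2]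
  if (heap.length : Int) > tp.1 then
    match PySem.List.min? heap (fun y => y) with
    | some m => (heap.erase m, s.2 + m)   -- heappop: remove and return the minimum
    | none => (heap, s.2)                 -- unreachable: heap is nonempty after the push
  else (heap, s.2)

def min_missed_penalty (tasks : List (Int × Int)) : Int :=
  let sorted_tasks := PySem.List.sorted tasks (fun x => x.1) false
  (sorted_tasks.foldl pvStepA ([], 0)).2

-- ===== PORT B =====
-- B's while-loop insertion: place x after every element ≤ x (ascending order kept)
def pvInsertAsc (x : Int) : List Int → List Int
  | [] => [x]
  | y :: ys => if y ≤ x then y :: pvInsertAsc x ys else x :: y :: ys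

-- loop body of B: insert in order, then evict the front (minimum) if over the deadline
def pvStepB (s : List Int × Int) (tp : Int × Int) : List Int × Int :=
  let kept := pvInsertAsc tp.2 s.1
  let ksum := s.2 + tp.2
  if (kept.length : Int) > tp.1 then
    match kept with
    | [] => (kept, ksum)                  -- unreachable: kept is nonempty after the insert
    | m :: rest => (rest, ksum - m)
  else (kept, ksum)

def min_missed_penalty_alt (tasks : List (Int × Int)) : Int :=
  let total := tasks.foldl (fun a t => a + t.2) 0
  let st := (PySem.List.sorted tasks (fun x => x.1) false).foldl pvStepB ([], 0)
  total - st.2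

-- ===== PRECONDITION & SPEC =====
def Spec_min_missed_penalty (tasks : List (Int × Int)) (out : Int) : Prop := out = min_missed_penalty_alt tasks
instance (tasks : List (Int × Int)) (out : Int) : Decidable (Spec_min_missed_penalty tasks out) := by unfold Spec_min_missed_penalty; infer_instance

-- ===== CLAIM (what is proved, stated in full; the proofs are below) =====
def Claim_equal_min_missed_penalty : Prop := ∀ (tasks : List (Int × Int)), Dom_min_missed_penalty tasks → Spec_min_missed_penalty tasks (min_missed_penalty tasks)

-- ===== LEMMAS AND PROOFS =====
theorem pvInsertAsc_perm (x : Int) (k : List Int) : (pvInsertAsc x k).Perm (x :: k) := by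
  induction k with
  | nil => simp [pvInsertAsc]
  | cons y ys ih =>
    simp only [pvInsertAsc]
    split
    · exact ((ih.cons y).trans (List.Perm.swap x y ys))
    · exact List.Perm.refl _

theorem pvInsertAsc_pairwise (x : Int) (k : List Int) (h : k.Pairwise (· ≤ ·)) :
    (pvInsertAsc x k).Pairwise (· ≤ ·) := by
  induction k with
  | nil => simp [pvInsertAsc]
  | cons y ys ih =>
    rcases List.pairwise_cons.mp h with ⟨hy, hys⟩
    simp only [pvInsertAsc]
    split
    · rename_i hle
      refine List.pairwise_cons.mpr ⟨?_, ih hys⟩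
      intro z hz
      rcases List.mem_cons.mp ((pvInsertAsc_perm x ys).mem_iff.mp hz) with rfl | h2
      · exact hle
      · exact hy z h2
    · rename_i hgt
      refine List.pairwise_cons.mpr ⟨?_, h⟩
      intro z hz
      rcases List.mem_cons.mp hz with rfl | h2
      · exact le_of_lt (lt_of_not_ge hgt)
      · exact le_of_lt (lt_of_lt_of_le (lt_of_not_ge hgt) (hy z h2))

-- the bisimulation invariant, pushed through the shared fold
theorem pvLoop (l : List (Int × Int)) : ∀ (h k : List Int) (miss ksum : Int),
    h.Perm k → k.Pairwise (· ≤ ·) → ksum = k.sum →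
    (l.foldl pvStepA (h, miss)).2 + (l.foldl pvStepB (k, ksum)).2
      = miss + ksum + (l.map (fun t => t.2)).sum := by
  induction l with
  | nil => intro h k miss ksum _ _ _; simp
  | cons tp l ih =>
    intro h k miss ksum hperm hpw hsum
    simp only [List.foldl_cons, List.map_cons, List.sum_cons]
    have hperm1 : (h ++ [tp.2]).Perm (pvInsertAsc tp.2 k) :=
      ((List.perm_append_singleton tp.2 h).trans (hperm.cons tp.2)).trans
        (pvInsertAsc_perm tp.2 k).symm
    have hpw1 : (pvInsertAsc tp.2 k).Pairwise (· ≤ ·) := pvInsertAsc_pairwise _ _ hpw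
    have hlen : (h ++ [tp.2]).length = (pvInsertAsc tp.2 k).length := hperm1.length_eq
    have hsum1 : ksum + tp.2 = (pvInsertAsc tp.2 k).sum := by
      rw [(pvInsertAsc_perm tp.2 k).sum_eq, List.sum_cons, hsum]; ring
    simp only [pvStepA, pvStepB]
    by_cases hc : ((h ++ [tp.2]).length : Int) > tp.1
    · have hc' : ((pvInsertAsc tp.2 k).length : Int) > tp.1 := by rw [← hlen]; exact hc
      rw [if_pos hc, if_pos hc']
      -- the inserted list is nonempty
      cases hk : pvInsertAsc tp.2 k with
      | nil =>
        exfalso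
        have hlen0 := hperm1.length_eq
        rw [hk] at hlen0
        simp at hlen0
      | cons m rest =>
        -- the heap's minimum equals the front of the sorted kept list
        have hmemm : m ∈ h ++ [tp.2] := hperm1.mem_iff.mpr (by rw [hk]; exact List.mem_cons_self)
        have hne : h ++ [tp.2] ≠ [] := by simp
        cases hmin : PySem.List.min? (h ++ [tp.2]) (fun y => y) with
        | none =>
          exact absurd ((PySem.List.min?_eq_none_iff _ _).mp hmin) hne
        | some m' =>
          have hm'le : m' ≤ m := PySem.List.min?_isMin hmin m hmemm
          have hm'mem : m' ∈ h ++ [tp.2] := PySem.List.min?_mem hmin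
          have hm'k : m' ∈ m :: rest := by rw [← hk]; exact hperm1.mem_iff.mp hm'mem
          have hlem' : m ≤ m' := by
            rcases List.mem_cons.mp hm'k with rfl | hmem
            · exact le_refl _
            · rw [hk] at hpw1
              exact (List.pairwise_cons.mp hpw1).1 m' hmem
          have hmm : m' = m := le_antisymm hm'le hlem'
          subst hmm
          have hperm2 : ((h ++ [tp.2]).erase m').Perm rest := by
            have := hperm1.erase m'
            rw [hk] at this
            simpa using this
          have hpw2 : rest.Pairwise (· ≤ ·) := by
            rw [hk] at hpw1; exact (List.pairwise_cons.mp hpw1).2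
          have hsum2 : ksum + tp.2 - m' = rest.sum := by
            rw [hsum1, hk, List.sum_cons]; ring
          have := ih ((h ++ [tp.2]).erase m') rest (miss + m') (ksum + tp.2 - m')
            hperm2 hpw2 hsum2
          rw [this]; ring
    · have hc' : ¬ ((pvInsertAsc tp.2 k).length : Int) > tp.1 := by rw [← hlen]; exact hc
      rw [if_neg hc, if_neg hc']
      have := ih (h ++ [tp.2]) (pvInsertAsc tp.2 k) miss (ksum + tp.2) hperm1 hpw1 hsum1
      rw [this]; ring

-- ===== VERDICT (by name: the statement is the Claim_ definition above) =====
theorem min_missed_penalty_spec : Claim_equal_min_missed_penalty := by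
  intro tasks _
  unfold Spec_min_missed_penalty
  show min_missed_penalty tasks = min_missed_penalty_alt tasks
  have hmain := pvLoop (PySem.List.sorted tasks (fun x => x.1) false) [] [] 0 0
    (List.Perm.refl _) (List.Pairwise.nil) rfl
  have htotal : tasks.foldl (fun a t => a + t.2) 0 = (tasks.map (fun t => t.2)).sum := by
    rw [PySem.List.foldl_add]; ring
  have hpsum : ((PySem.List.sorted tasks (fun x => x.1) false).map (fun t => t.2)).sum
      = (tasks.map (fun t => t.2)).sum :=
    ((PySem.List.sorted_perm tasks (fun x => x.1) false).map _).sum_eq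
  rw [hpsum] at hmain
  simp only [min_missed_penalty, min_missed_penalty_alt, htotal]
  omega
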